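-- pv_equiv track=rewrite | github.com/pypi-data/pypi-mirror-398 | packages/ynab-tui/ynab_tui-0.1.1.tar.gz/ynab_tui-0.1.1/ynab_tui/utils/fuzzy.py | word_boundary_match
-- ===== SOURCE A (Python) =====
-- def fuzzy_match(query: str, text: str) -> bool:
--     """Fuzzy match: all query chars must appear in text in order (fzf-style).
--
--     Args:
--         query: Characters to search for.
--         text: Text to search in.
--
--     Returns:
--         True if all query chars appear in text in order.
--     """
--     query_idx = 0
--     for char in text:
--         if query_idx < len(query) and char == query[query_idx]:
--             query_idx += 1
--     return query_idx == len(query)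
--
-- def word_boundary_match(query: str, text: str) -> bool:
--     """Word-boundary fuzzy match: prioritizes matching at word starts.
--
--     Matches if query characters appear in order, with bonus for word boundaries.
--     A match is valid if each query character matches either:
--     - At a word boundary (start of word, after space/punctuation)
--     - After the previous matched character
--
--     Args:
--         query: Characters to search for.
--         text: Text to search in.
--
--     Returns:
--         True if query matches with word boundary preference.
--     """
--     if not query:
--         return True
--     if not text:
--         return False
--
--     # First try: match at word boundaries only
--     query_idx = 0
--     prev_was_boundary = True  # Start of string is a boundary
--
--     for char in text:
--         is_boundary = prev_was_boundary
--         if query_idx < len(query) and char == query[query_idx] and is_boundary: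
--             query_idx += 1
--
--         # Next char is a boundary if this char is a separator
--         prev_was_boundary = not char.isalnum()
--
--     if query_idx == len(query):
--         return True
--
--     # Fall back to regular fuzzy match if word boundary match fails
--     return fuzzy_match(query, text)
-- ===== SOURCE B (Python) =====
-- def word_boundary_match(query: str, text: str) -> bool:
--     """Query-driven match: jump through text with str.find per query char."""
--     if not query:
--         return True
--     if not text:
--         return False
--
--     # Phase 1: for each query char, jump to its next occurrence that sits at a
--     # word boundary (index 0, or preceded by a non-alphanumeric char).
--     pos = -1
--     for c in query:
--         while True:
--             pos = text.find(c, pos + 1)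
--             if pos < 0 or pos == 0 or not text[pos - 1].isalnum():
--                 break
--         if pos < 0:
--             break
--     else:
--         return True
--
--     # Phase 2: plain fuzzy fallback, same find-jump walk without the boundary test.
--     pos = -1
--     for c in query:
--         pos = text.find(c, pos + 1)
--         if pos < 0:
--             return False
--     return True
-- ===== Notes on version B (the rewrite author's own statement) =====
-- stated objective: alternative
-- what changed: A's single text-driven scan (one pass over text consuming query chars while tracking a boundary flag) is replaced by a query-driven walk: for each query char B jumps through the text with str.find, in the first phase repeatedly finding the next occurrence until one sits at a word boundary, then a find-jump fallback; no pass over all text characters is made.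
import Mathlib
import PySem

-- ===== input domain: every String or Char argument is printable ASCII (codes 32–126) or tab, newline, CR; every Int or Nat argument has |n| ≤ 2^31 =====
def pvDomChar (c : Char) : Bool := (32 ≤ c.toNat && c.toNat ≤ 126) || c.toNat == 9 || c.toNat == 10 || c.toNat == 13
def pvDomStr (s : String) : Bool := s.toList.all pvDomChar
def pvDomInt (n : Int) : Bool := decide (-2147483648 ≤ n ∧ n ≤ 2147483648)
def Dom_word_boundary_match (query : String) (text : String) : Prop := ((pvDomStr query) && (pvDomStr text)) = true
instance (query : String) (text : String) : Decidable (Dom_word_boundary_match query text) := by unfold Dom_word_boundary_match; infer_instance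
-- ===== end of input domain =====

-- B replaces A's text-driven scan by a query-driven walk that jumps through the text
-- with str.find per query character (objective: alternative decomposition, same cost).

-- ===== PORT A =====
-- fuzzy_match's loop: for char in text: if query_idx < len(query) and char == query[query_idx]: query_idx += 1
def pvFuzzyLoop (q : List Char) : List Char → Nat → Nat
  | [], idx => idx
  | c :: rest, idx =>
      pvFuzzyLoop q rest (if idx < q.length && q.getD idx ' ' == c then idx + 1 else idx)

def fuzzy_match_A (query : String) (text : String) : Bool :=
  pvFuzzyLoop query.toList text.toList 0 == query.toList.length

-- word_boundary_match's first loop, carrying query_idx and prev_was_boundary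
def pvBoundLoop (q : List Char) : List Char → Nat → Bool → Nat
  | [], idx, _ => idx
  | c :: rest, idx, prevB =>
      pvBoundLoop q rest (if idx < q.length && q.getD idx ' ' == c && prevB then idx + 1 else idx)
        (!(PySem.Chars.isalnum c))

def word_boundary_match (query : String) (text : String) : Bool :=
  if query.toList.isEmpty then true
  else if text.toList.isEmpty then false
  else if pvBoundLoop query.toList text.toList 0 true == query.toList.length then true
  else fuzzy_match_A query text

-- ===== PORT B =====
-- text.find(c, start): smallest index j ≥ start with text[j] = c, as an Option (none = -1);
-- exact hand port of str.find with a start argument.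
def pvFindFrom : List Char → Char → Nat → Option Nat
  | [], _, _ => none
  | d :: ts, c, 0 => if c == d then some 0 else (pvFindFrom ts c 0).map (· + 1)
  | _ :: ts, c, i + 1 => (pvFindFrom ts c i).map (· + 1)

-- bounds needed by pvBWhile's termination measure
theorem pvFindFrom_bounds {t : List Char} {c : Char} {i j : Nat}
    (h : pvFindFrom t c i = some j) : i ≤ j ∧ j < t.length := by
  induction t generalizing i j with
  | nil => simp [pvFindFrom] at h
  | cons d ts ih =>
    cases i with
    | zero =>
      by_cases hc : c == d
      · simp [pvFindFrom, hc] at h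
        simp only [List.length_cons]
        omega
      · simp only [pvFindFrom, hc, Bool.false_eq_true, if_false, Option.map_eq_some_iff] at h
        obtain ⟨j', hj', rfl⟩ := h
        have := ih hj'; simp; omega
    | succ i =>
      simp only [pvFindFrom, Option.map_eq_some_iff] at h
      obtain ⟨j', hj', rfl⟩ := h
      have := ih hj'; simp; omega

-- B's inner while: repeatedly find the next occurrence of c until it is at a word boundary
def pvBWhile (t : List Char) (c : Char) (start : Nat) : Option Nat :=
  match h : pvFindFrom t c start with
  | none => none
  | some p =>
      if p == 0 || !(PySem.Chars.isalnum (t.getD (p - 1) ' ')) then some p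
      else pvBWhile t c (p + 1)
termination_by t.length - start
decreasing_by have := pvFindFrom_bounds h; omega

-- phase 1: for c in query: pos = <next boundary occurrence>; fail if none
def pvLoopB (t : List Char) : List Char → Nat → Bool
  | [], _ => true
  | c :: qs, start =>
      match pvBWhile t c start with
      | none => false
      | some p => pvLoopB t qs (p + 1)

-- phase 2: for c in query: pos = text.find(c, pos+1); fail if none
def pvLoopF (t : List Char) : List Char → Nat → Bool
  | [], _ => true
  | c :: qs, start =>
      match pvFindFrom t c start with
      | none => false
      | some p => pvLoopF t qs (p + 1)

def word_boundary_match_alt (query : String) (text : String) : Bool :=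
  if query.toList.isEmpty then true
  else if text.toList.isEmpty then false
  else if pvLoopB text.toList query.toList 0 then true
  else pvLoopF text.toList query.toList 0

-- ===== PRECONDITION & SPEC =====
def Spec_word_boundary_match (query : String) (text : String) (out : Bool) : Prop := out = word_boundary_match_alt query text
instance (query : String) (text : String) (out : Bool) : Decidable (Spec_word_boundary_match query text out) := by unfold Spec_word_boundary_match; infer_instance

-- ===== CLAIM (what is proved, stated in full; the proofs are below) =====
def Claim_equal_word_boundary_match : Prop := ∀ (query : String) (text : String), Dom_word_boundary_match query text → Spec_word_boundary_match query text (word_boundary_match query text)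

-- ===== LEMMAS AND PROOFS =====

-- plain greedy subsequence test (proof-side characterisation of A's fuzzy loop)
def pvSubseq : List Char → List Char → Bool
  | [], _ => true
  | _ :: _, [] => false
  | c :: qs, d :: ts => if c == d then pvSubseq qs ts else pvSubseq (c :: qs) ts

-- text annotated with its word-boundary flags (flag of a char = prev char non-alnum)
def pvAnn : Bool → List Char → List (Char × Bool)
  | _, [] => []
  | b, c :: ts => (c, b) :: pvAnn (!(PySem.Chars.isalnum c)) ts

-- greedy subsequence test over flagged text, consuming only at flagged positions
def subseqFlag : List Char → List (Char × Bool) → Bool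
  | [], _ => true
  | _ :: _, [] => false
  | c :: qs, (d, f) :: ts => if f && c == d then subseqFlag qs ts else subseqFlag (c :: qs) ts

-- A side ------------------------------------------------------------------

theorem pvFuzzyLoop_full (q : List Char) (t : List Char) :
    pvFuzzyLoop q t q.length = q.length := by
  induction t with
  | nil => rfl
  | cons c rest ih => simp [pvFuzzyLoop, ih]

theorem pvFuzzyLoop_eq_subseq (q : List Char) (t : List Char) (idx : Nat) (h : idx ≤ q.length) :
    (pvFuzzyLoop q t idx == q.length) = pvSubseq (q.drop idx) t := by
  induction t generalizing idx with
  | nil =>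
    rcases Nat.lt_or_eq_of_le h with hlt | heq
    · have hne : idx ≠ q.length := Nat.ne_of_lt hlt
      have : q.drop idx ≠ [] := by simp [List.drop_eq_nil_iff]; omega
      rcases List.exists_cons_of_ne_nil this with ⟨a, l, hd⟩
      simp [pvFuzzyLoop, hd, pvSubseq, hne]
    · subst heq; simp [pvFuzzyLoop, pvSubseq]
  | cons c rest ih =>
    rcases Nat.lt_or_eq_of_le h with hlt | heq
    · have hd : q.drop idx = q[idx] :: q.drop (idx + 1) := List.drop_eq_getElem_cons hlt
      by_cases hc : q[idx] = c
      · have : (idx < q.length && q.getD idx ' ' == c) = true := by simp [hlt, hc]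
        simp only [pvFuzzyLoop, this, if_true]
        rw [ih (idx + 1) (by omega), hd]
        simp [pvSubseq, hc]
      · have : (idx < q.length && q.getD idx ' ' == c) = false := by simp [hlt, hc]
        simp only [pvFuzzyLoop, this, Bool.false_eq_true, if_false]
        rw [ih idx (by omega), hd]
        conv_rhs => rw [pvSubseq]
        simp [hc]
    · subst heq
      simp only [pvFuzzyLoop]
      have : (q.length < q.length && q.getD q.length ' ' == c) = false := by simp
      simp [pvFuzzyLoop_full, pvSubseq]

theorem pvBoundLoop_full (q : List Char) (t : List Char) (b : Bool) :
    pvBoundLoop q t q.length b = q.length := by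
  induction t generalizing b with
  | nil => rfl
  | cons c rest ih => simp [pvBoundLoop, ih]

theorem pvBoundLoop_eq_subseqFlag (q : List Char) (t : List Char) (idx : Nat) (b : Bool)
    (h : idx ≤ q.length) :
    (pvBoundLoop q t idx b == q.length) = subseqFlag (q.drop idx) (pvAnn b t) := by
  induction t generalizing idx b with
  | nil =>
    rcases Nat.lt_or_eq_of_le h with hlt | heq
    · have hne : idx ≠ q.length := Nat.ne_of_lt hlt
      have : q.drop idx ≠ [] := by simp [List.drop_eq_nil_iff]; omega
      rcases List.exists_cons_of_ne_nil this with ⟨a, l, hd⟩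
      simp [pvBoundLoop, hd, pvAnn, subseqFlag, hne]
    · subst heq; simp [pvBoundLoop, pvAnn, subseqFlag]
  | cons c rest ih =>
    rcases Nat.lt_or_eq_of_le h with hlt | heq
    · have hd : q.drop idx = q[idx] :: q.drop (idx + 1) := List.drop_eq_getElem_cons hlt
      by_cases hc : q[idx] = c ∧ b = true
      · have : (idx < q.length && q.getD idx ' ' == c && b) = true := by
          simp [hlt, hc.1, hc.2]
        simp only [pvBoundLoop, this, if_true]
        rw [ih (idx + 1) _ (by omega), hd]
        simp [pvAnn, subseqFlag, hc.1, hc.2]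
      · have hgd : q.getD idx ' ' = q[idx] := by
          simp [List.getD, List.getElem?_eq_getElem hlt]
        have : (idx < q.length && q.getD idx ' ' == c && b) = false := by
          rcases Decidable.not_and_iff_not_or_not.mp hc with h1 | h2
          · rw [hgd]; simp [h1]
          · simp [h2]
        simp only [pvBoundLoop, this, Bool.false_eq_true, if_false]
        rw [ih idx _ (by omega), hd]
        conv_rhs => rw [pvAnn, subseqFlag]
        have : (b && q[idx] == c) = false := by
          rcases Decidable.not_and_iff_not_or_not.mp hc with h1 | h2
          · simp [h1]
          · simp [h2]
        rw [this]
        simp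
    · subst heq
      rw [pvBoundLoop_full, List.drop_length]
      have h0 : subseqFlag [] (pvAnn b (c :: rest)) = true := rfl
      rw [h0]
      simp

-- B side ------------------------------------------------------------------

-- find with a start = findIdx? on the dropped suffix
theorem pvFindFrom_eq_findIdx? (t : List Char) (c : Char) (start : Nat) :
    pvFindFrom t c start = ((t.drop start).findIdx? (fun d => c == d)).map (· + start) := by
  induction t generalizing start with
  | nil => simp [pvFindFrom]
  | cons d ts ih =>
    cases start with
    | zero =>
      by_cases hc : c == d
      · simp [pvFindFrom, hc, List.findIdx?_cons]
      · simp only [pvFindFrom, hc, Bool.false_eq_true, if_false, List.drop_zero,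
          List.findIdx?_cons, Option.map_map]
        rw [ih 0]
        simp [Option.map_map]; rfl
    | succ i =>
      simp only [pvFindFrom, List.drop_succ_cons]
      rw [ih i]
      cases h : (ts.drop i).findIdx? (fun d => c == d) <;> simp [h] <;> omega

-- stepping a flagged subsequence test by the first character match (pure list form of the while)
theorem subseqFlag_step (c : Char) (qs : List Char) (l : List (Char × Bool)) :
    subseqFlag (c :: qs) l =
      (match l.findIdx? (fun x => c == x.1) with
       | none => false
       | some j =>
          if (l.getD j (' ', false)).2 then subseqFlag qs (l.drop (j + 1))
          else subseqFlag (c :: qs) (l.drop (j + 1))) := by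
  induction l with
  | nil => simp [subseqFlag]
  | cons df ts ih =>
    obtain ⟨d, f⟩ := df
    by_cases hc : c == d
    · cases f <;> simp [subseqFlag, List.findIdx?_cons, hc, List.getD]
    · have h1 : (f && c == d) = false := by simp [hc]
      rw [subseqFlag, h1]
      simp only [List.findIdx?_cons, hc]
      rw [ih]
      cases h : ts.findIdx? (fun x => c == x.1) with
      | none => simp [h]
      | some j => simp [h, List.getD]

-- same step for the unflagged test
theorem pvSubseq_step (c : Char) (qs : List Char) (l : List Char) :
    pvSubseq (c :: qs) l =
      (match l.findIdx? (fun d => c == d) with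
       | none => false
       | some j => pvSubseq qs (l.drop (j + 1))) := by
  induction l with
  | nil => simp [pvSubseq]
  | cons d ts ih =>
    by_cases hc : c == d
    · simp [pvSubseq, List.findIdx?_cons, hc]
    · rw [pvSubseq, if_neg hc]
      simp only [List.findIdx?_cons, hc]
      rw [ih]
      cases h : ts.findIdx? (fun d => c == d) with
      | none => simp [h]
      | some j => simp [h]

-- chars of the annotated text
theorem pvAnn_map_fst (b : Bool) (t : List Char) : (pvAnn b t).map Prod.fst = t := by
  induction t generalizing b with
  | nil => rfl
  | cons c ts ih => simp [pvAnn, ih]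

-- the flag at a positive position is independent of the initial flag
theorem pvAnn_flag_pos (b : Bool) (t : List Char) (k : Nat) (hk : k + 1 < t.length) :
    ((pvAnn b t).getD (k + 1) (' ', false)).2
      = !(PySem.Chars.isalnum (t.getD k ' ')) := by
  induction t generalizing b k with
  | nil => simp at hk
  | cons c ts ih =>
    cases k with
    | zero =>
      cases ts with
      | nil => simp at hk
      | cons d ts' => simp [pvAnn, List.getD]
    | succ m =>
      have hm : m + 1 < ts.length := by simpa using Nat.lt_of_succ_lt_succ hk
      simp only [pvAnn, List.getD_cons_succ]
      rw [ih _ m hm]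

-- flag at position j of the annotated text = B's boundary check at index j
theorem pvAnn_flag (t : List Char) (j : Nat) (hj : j < t.length) :
    ((pvAnn true t).getD j (' ', false)).2
      = (j == 0 || !(PySem.Chars.isalnum (t.getD (j - 1) ' '))) := by
  cases j with
  | zero =>
    cases t with
    | nil => simp at hj
    | cons c ts => simp [pvAnn, List.getD]
  | succ k =>
    rw [pvAnn_flag_pos true t k hj]
    simp

-- findIdx? over the annotated text looking only at the char = find on the raw text
theorem findIdx?_ann (b : Bool) (t : List Char) (c : Char) (start : Nat) :
    ((pvAnn b t).drop start).findIdx? (fun x => c == x.1)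
      = (t.drop start).findIdx? (fun d => c == d) := by
  have h1 : (t.drop start) = ((pvAnn b t).drop start).map Prod.fst := by
    rw [List.map_drop, pvAnn_map_fst]
  rw [h1, List.findIdx?_map]
  rfl

-- non-dependent unfolding of pvBWhile
theorem pvBWhile_eq (t : List Char) (c : Char) (start : Nat) :
    pvBWhile t c start =
      match pvFindFrom t c start with
      | none => none
      | some p =>
          if p == 0 || !(PySem.Chars.isalnum (t.getD (p - 1) ' ')) then some p
          else pvBWhile t c (p + 1) := by
  rw [pvBWhile]
  cases h : pvFindFrom t c start <;> simp

-- B's while loop + continuation = flagged greedy subsequence on the suffix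
theorem pvBWhile_subseqFlag (t : List Char) (c : Char) (qs : List Char) (start : Nat) :
    (match pvBWhile t c start with
     | none => false
     | some p => subseqFlag qs ((pvAnn true t).drop (p + 1)))
      = subseqFlag (c :: qs) ((pvAnn true t).drop start) := by
  rw [subseqFlag_step, findIdx?_ann, pvBWhile_eq]
  cases hf : pvFindFrom t c start with
  | none =>
    have hf' := hf
    rw [pvFindFrom_eq_findIdx?] at hf'
    rcases h : (t.drop start).findIdx? (fun d => c == d) with _ | j
    · simp
    · rw [h] at hf'; simp at hf'
  | some p =>
    have hb := pvFindFrom_bounds hf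
    have hf' := hf
    rw [pvFindFrom_eq_findIdx?] at hf'
    rcases h : (t.drop start).findIdx? (fun d => c == d) with _ | j
    · rw [h] at hf'; simp at hf'
    · rw [h] at hf'
      simp only [Option.map_some] at hf'
      have hp : p = j + start := by simpa using hf'.symm
      subst hp
      have hget : ((pvAnn true t).drop start).getD j (' ', false)
          = (pvAnn true t).getD (start + j) (' ', false) := by
        simp [List.getD, List.getElem?_drop]
      have hlen : j + start < t.length := by omega
      have hflag : (((pvAnn true t).drop start).getD j (' ', false)).2
          = (j + start == 0 || !(PySem.Chars.isalnum (t.getD (j + start - 1) ' '))) := by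
        rw [hget, Nat.add_comm start j, pvAnn_flag t (j + start) hlen]
      have hdrop : ((pvAnn true t).drop start).drop (j + 1) = (pvAnn true t).drop (j + start + 1) := by
        rw [List.drop_drop]; ring_nf
      by_cases hbnd : (j + start == 0 || !(PySem.Chars.isalnum (t.getD (j + start - 1) ' '))) = true
      · -- boundary holds: the while returns this position
        simp only []
        rw [if_pos hbnd]
        simp only []
        rw [hflag, hbnd, if_pos rfl, hdrop]
      · -- boundary fails: the while recurses from the next index
        have hflag' : (((pvAnn true t).drop start).getD j (' ', false)).2 = false := by
          rw [hflag]; simpa using hbnd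
        simp only []
        rw [if_neg hbnd, hflag']
        simp only [Bool.false_eq_true, if_false]
        rw [pvBWhile_subseqFlag t c qs (j + start + 1), hdrop]
termination_by t.length - start
decreasing_by omega

-- phase 1 = flagged subsequence test
theorem pvLoopB_eq (t : List Char) (q : List Char) (start : Nat) :
    pvLoopB t q start = subseqFlag q ((pvAnn true t).drop start) := by
  induction q generalizing start with
  | nil => simp [pvLoopB, subseqFlag]
  | cons c qs ih =>
    rw [← pvBWhile_subseqFlag t c qs start, pvLoopB]
    cases h : pvBWhile t c start with
    | none => simp
    | some p => simp [ih]

-- phase 2 = plain subsequence test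
theorem pvLoopF_eq (t : List Char) (q : List Char) (start : Nat) :
    pvLoopF t q start = pvSubseq q (t.drop start) := by
  induction q generalizing start with
  | nil => simp [pvLoopF, pvSubseq]
  | cons c qs ih =>
    rw [pvSubseq_step, pvLoopF, pvFindFrom_eq_findIdx?]
    cases h : (t.drop start).findIdx? (fun d => c == d) with
    | none => simp [h]
    | some j =>
      simp only [h, Option.map_some]
      rw [ih (j + start + 1), List.drop_drop]
      ring_nf

-- ===== VERDICT (by name: the statement is the Claim_ definition above) =====
theorem word_boundary_match_spec : Claim_equal_word_boundary_match := by
  intro query text _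
  unfold Spec_word_boundary_match word_boundary_match word_boundary_match_alt
  by_cases hq : query.toList.isEmpty
  · simp [hq]
  · by_cases ht : text.toList.isEmpty
    · simp [hq, ht]
    · simp only [hq, ht]
      rw [pvBoundLoop_eq_subseqFlag _ _ 0 true (Nat.zero_le _),
        pvLoopB_eq, List.drop_zero, List.drop_zero,
        fuzzy_match_A, pvFuzzyLoop_eq_subseq _ _ 0 (Nat.zero_le _),
        pvLoopF_eq, List.drop_zero]
      simp
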